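-- pv_equiv track=rewrite | github.com/DenisGazizov/algo | trie.py | stringIndices
-- ===== SOURCE A (Python) =====
-- from typing import List
--
-- def stringIndices(wordsContainer: List[str], wordsQuery: List[str]) -> \
-- List[int]:
--     trie = {}
--     for i, word in enumerate(wordsContainer):
--         spot = trie
--         if None not in spot or spot[None][1] > len(word):
--             spot[None] = (i, len(word))
--         for c in reversed(word):
--             if c not in spot:
--                 spot[c] = {}
--             spot = spot[c]
--             if None not in spot or spot[None][1] > len(word):
--                 spot[None] = (i, len(word))
--     ans = []
--     for word in wordsQuery:
--         spot = trie
--         for c in reversed(word):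
--             if c not in spot:
--                 break
--             spot = spot[c]
--         ans.append(spot[None][0])
--     return ans
-- ===== SOURCE B (Python) =====
-- from typing import List
--
-- def stringIndices(wordsContainer: List[str], wordsQuery: List[str]) -> List[int]:
--     # Trie-free: direct scan per query with tie-break (longest common suffix, shortest word, smallest index).
--     def suf(a: str, b: str) -> int:
--         k = 0
--         while k < len(a) and k < len(b) and a[len(a) - 1 - k] == b[len(b) - 1 - k]:
--             k += 1
--         return k
--     ans = []
--     for q in wordsQuery:
--         best = None
--         for i, w in enumerate(wordsContainer):
--             key = (-suf(w, q), len(w))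
--             if best is None or key < best[0]:
--                 best = (key, i)
--         ans.append(best[1])
--     return ans
-- ===== Notes on version B (the rewrite author's own statement) =====
-- stated objective: simpler
-- what changed: B drops A's suffix-trie construction entirely and, for each query, does a direct scan of the container keeping the best candidate under the key (longest common suffix, then shortest word, then smallest index).
import Mathlib
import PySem

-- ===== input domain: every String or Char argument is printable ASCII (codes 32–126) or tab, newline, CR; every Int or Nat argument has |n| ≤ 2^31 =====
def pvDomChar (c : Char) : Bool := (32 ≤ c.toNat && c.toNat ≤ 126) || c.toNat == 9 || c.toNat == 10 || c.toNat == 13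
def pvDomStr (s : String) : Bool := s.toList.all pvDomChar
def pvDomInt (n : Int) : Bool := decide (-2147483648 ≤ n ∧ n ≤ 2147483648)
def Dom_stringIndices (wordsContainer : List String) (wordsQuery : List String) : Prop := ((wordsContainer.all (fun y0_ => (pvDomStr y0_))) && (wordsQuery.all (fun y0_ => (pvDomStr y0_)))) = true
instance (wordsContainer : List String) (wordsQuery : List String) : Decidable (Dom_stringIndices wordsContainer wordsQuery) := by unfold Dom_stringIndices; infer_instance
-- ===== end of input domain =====

-- B drops A's suffix trie: per query it scans the container once, keeping the best
-- candidate under the key (longest common suffix, then shortest word, then smallest index).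
-- Objective: simpler (no index structure); not claimed faster.

-- ===== PORT A =====
-- Python's nested-dict trie: each node carries the stored best `(index, length)` pair
-- (the `None` key) and an association list of children in insertion order.
mutual
inductive PvTrie where
  | mk : Option (Int × Int) → PvChildren → PvTrie
inductive PvChildren where
  | nil : PvChildren
  | cons : Char → PvTrie → PvChildren → PvChildren
end

-- `spot[c]` / `spot.get(c)` on the children dict
def pvChildGet (ch : PvChildren) (c : Char) : Option PvTrie :=
  match ch with
  | PvChildren.nil => none
  | PvChildren.cons c' t rest => if c' = c then some t else pvChildGet rest c

-- in-place update `spot[c] = t` (overwrite keeps position, new key appended)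
def pvChildSet (ch : PvChildren) (c : Char) (t : PvTrie) : PvChildren :=
  match ch with
  | PvChildren.nil => PvChildren.cons c t PvChildren.nil
  | PvChildren.cons c' t' rest =>
      if c' = c then PvChildren.cons c' t rest
      else PvChildren.cons c' t' (pvChildSet rest c t)

-- `if None not in spot or spot[None][1] > len(word): spot[None] = (i, len(word))`
def pvUpd (b : Option (Int × Int)) (i ℓ : Int) : Option (Int × Int) :=
  match b with
  | none => some (i, ℓ)
  | some (j, m) => if m > ℓ then some (i, ℓ) else some (j, m)

-- the insertion loop `for c in reversed(word)` (cs = reversed word), mutating along the path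
def pvInsert (t : PvTrie) (cs : List Char) (i ℓ : Int) : PvTrie :=
  match t, cs with
  | PvTrie.mk b ch, [] => PvTrie.mk (pvUpd b i ℓ) ch
  | PvTrie.mk b ch, c :: rest =>
      PvTrie.mk (pvUpd b i ℓ)
        (pvChildSet ch c
          (pvInsert ((pvChildGet ch c).getD (PvTrie.mk none PvChildren.nil)) rest i ℓ))

-- the query loop: follow `reversed(word)` while the child exists, then read spot[None]
def pvLook (t : PvTrie) (cs : List Char) : Option (Int × Int) :=
  match t, cs with
  | PvTrie.mk b _, [] => b
  | PvTrie.mk b ch, c :: rest =>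
      match pvChildGet ch c with
      | none => b
      | some t' => pvLook t' rest

def stringIndices (wordsContainer : List String) (wordsQuery : List String) : List Int :=
  let trie := (PySem.List.enumerate wordsContainer 0).foldl
    (fun t p => pvInsert t p.2.toList.reverse p.1 (PySem.Str.len p.2))
    (PvTrie.mk none PvChildren.nil)
  wordsQuery.map (fun q =>
    match pvLook trie q.toList.reverse with
    | some (i, _) => i
    | none => 0)  -- unreachable under Pre_ (Python raises KeyError: container empty, query present)

-- ===== PORT B =====
-- `suf(a, b)`: length of the common suffix, computed by comparing from the end
-- (= common-prefix length of the reversed character lists)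
def pvSuf (a b : List Char) : Nat :=
  match a, b with
  | x :: a', y :: b' => if x = y then pvSuf a' b' + 1 else 0
  | _, _ => 0

def stringIndices_alt (wordsContainer : List String) (wordsQuery : List String) : List Int :=
  wordsQuery.map (fun q =>
    let best := (PySem.List.enumerate wordsContainer 0).foldl
      (fun best p =>
        let key : Int × Int := (-(pvSuf p.2.toList.reverse q.toList.reverse : Int), PySem.Str.len p.2)
        match best with
        | none => some (key, p.1)
        | some (bk, bi) => if key.1 < bk.1 ∨ (key.1 = bk.1 ∧ key.2 < bk.2) then some (key, p.1) else some (bk, bi))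
      none
    match best with
    | some (_, i) => i
    | none => 0)  -- unreachable under Pre_ (Python raises TypeError there)

-- ===== PRECONDITION & SPEC =====
-- Pre_ excludes exactly the inputs where Python A raises (KeyError): a nonempty query
-- list with an empty container; B raises there too (TypeError).
def Pre_stringIndices (wordsContainer : List String) (wordsQuery : List String) : Prop :=
  wordsQuery = [] ∨ wordsContainer ≠ []
instance (wordsContainer : List String) (wordsQuery : List String) : Decidable (Pre_stringIndices wordsContainer wordsQuery) := by unfold Pre_stringIndices; infer_instance

def pvWitness_stringIndices : List String × List String :=
  (["abcd", "bcd", "xbcd"], ["cd", "bcd", "xyz"])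

def Spec_stringIndices (wordsContainer : List String) (wordsQuery : List String) (out : List Int) : Prop := out = stringIndices_alt wordsContainer wordsQuery
instance (wordsContainer : List String) (wordsQuery : List String) (out : List Int) : Decidable (Spec_stringIndices wordsContainer wordsQuery out) := by unfold Spec_stringIndices; infer_instance

-- ===== CLAIM (what is proved, stated in full; the proofs are below) =====
def Claim_equal_stringIndices : Prop := ∀ (wordsContainer : List String) (wordsQuery : List String), Dom_stringIndices wordsContainer wordsQuery → Pre_stringIndices wordsContainer wordsQuery → Spec_stringIndices wordsContainer wordsQuery (stringIndices wordsContainer wordsQuery)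

-- ===== LEMMAS AND PROOFS =====

-- depth-tracking lookup: depth reached along cs plus the best stored at the final node
def pvLookD (t : PvTrie) (cs : List Char) : Nat × Option (Int × Int) :=
  match t, cs with
  | PvTrie.mk b _, [] => (0, b)
  | PvTrie.mk b ch, c :: rest =>
      match pvChildGet ch c with
      | none => (0, b)
      | some t' =>
          let p := pvLookD t' rest
          (p.1 + 1, p.2)

lemma pvLook_eq_lookD (t : PvTrie) (cs : List Char) : pvLook t cs = (pvLookD t cs).2 := by
  induction cs generalizing t with
  | nil => cases t; simp [pvLook, pvLookD]
  | cons c rest ih =>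
      cases t with
      | mk b ch =>
        simp only [pvLook, pvLookD]
        cases pvChildGet ch c with
        | none => rfl
        | some t' => exact ih t'

-- abstract single-insert effect on (depth, best)
def pvStep (p : Nat × Option (Int × Int)) (s : Nat) (i ℓ : Int) : Nat × Option (Int × Int) :=
  if s > p.1 then (s, some (i, ℓ))
  else if s = p.1 then (p.1, pvUpd p.2 i ℓ)
  else (p.1, p.2)

theorem pvChildGet_set_self : ∀ (ch : PvChildren) (c : Char) (t : PvTrie),
    pvChildGet (pvChildSet ch c t) c = some t
  | PvChildren.nil, c, t => by simp [pvChildSet, pvChildGet]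
  | PvChildren.cons c' t' rest, c, t => by
      by_cases h : c' = c <;>
        simp [pvChildSet, pvChildGet, h, pvChildGet_set_self rest c t]

theorem pvChildGet_set_ne : ∀ (ch : PvChildren) (c c' : Char) (t : PvTrie), c ≠ c' →
    pvChildGet (pvChildSet ch c t) c' = pvChildGet ch c'
  | PvChildren.nil, c, c', t, h => by simp [pvChildSet, pvChildGet, h]
  | PvChildren.cons c'' t'' rest, c, c', t, h => by
      by_cases h2 : c'' = c <;>
        simp [pvChildSet, pvChildGet, h2, h, pvChildGet_set_ne rest c c' t h]

-- inserting into the empty trie builds a chain; following cs reaches depth pvSuf ws cs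
-- and every node of the chain stores (i, ℓ)
lemma pvLookD_insert_empty (ws cs : List Char) (i ℓ : Int) :
    pvLookD (pvInsert (PvTrie.mk none PvChildren.nil) ws i ℓ) cs = (pvSuf ws cs, some (i, ℓ)) := by
  induction ws generalizing cs with
  | nil =>
      cases cs <;> simp [pvInsert, pvUpd, pvLookD, pvSuf, pvChildGet]
  | cons w ws' ih =>
      cases cs with
      | nil => simp [pvInsert, pvUpd, pvLookD, pvSuf]
      | cons c cs' =>
          simp only [pvInsert, pvUpd, pvLookD, pvSuf, pvChildGet, pvChildSet]
          by_cases h : w = c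
          · subst h
            simp [ih cs']
          · simp [h]

-- key lemma: effect of one insertion on the lookup state, for ANY trie
lemma pvLookD_insert (t : PvTrie) (ws cs : List Char) (i ℓ : Int) :
    pvLookD (pvInsert t ws i ℓ) cs = pvStep (pvLookD t cs) (pvSuf ws cs) i ℓ := by
  induction cs generalizing t ws with
  | nil =>
      cases t with
      | mk b ch =>
        cases ws <;> simp [pvInsert, pvLookD, pvStep, pvSuf]
  | cons c cs' ih =>
      cases t with
      | mk b ch =>
        cases ws with
        | nil =>
            simp only [pvInsert, pvLookD, pvSuf]
            cases hg : pvChildGet ch c with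
            | none => simp [pvStep]
            | some t' => simp [pvStep]
        | cons w ws' =>
            by_cases hw : w = c
            · subst hw
              simp only [pvInsert, pvLookD, pvSuf, pvChildGet_set_self]
              cases hg : pvChildGet ch w with
              | none =>
                  simp only [Option.getD_none]
                  rw [pvLookD_insert_empty]
                  simp [pvStep]
              | some t' =>
                  simp only [Option.getD_some]
                  rw [ih t' ws']
                  simp only [pvStep]
                  rcases pvLookD t' cs' with ⟨d, bb⟩
                  by_cases h1 : pvSuf ws' cs' > d
                  · simp [h1, Nat.succ_lt_succ h1]
                  · by_cases h2 : pvSuf ws' cs' = d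
                    · simp [h2]
                    · have h3 : ¬ (pvSuf ws' cs' + 1 > d + 1) := by omega
                      have h4 : ¬ (pvSuf ws' cs' + 1 = d + 1) := by omega
                      simp [h1, h2, h3]
            · simp only [pvInsert, pvLookD, pvSuf, if_neg (fun hh => hw hh)]
              rw [pvChildGet_set_ne ch w c _ hw]
              cases hg : pvChildGet ch c with
              | none => simp [pvStep, pvUpd]
              | some t' => simp [pvStep]

-- B's fold state as a (depth, best) pair
def pvToDB (st : Option ((Int × Int) × Int)) : Nat × Option (Int × Int) :=
  match st with
  | none => (0, none)
  | some ((nk, ℓ), i) => ((-nk).toNat, some (i, ℓ))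

-- B's fold step
def pvBStep (st : Option ((Int × Int) × Int)) (key : Int × Int) (i : Int) :
    Option ((Int × Int) × Int) :=
  match st with
  | none => some (key, i)
  | some (bk, bi) =>
      if key.1 < bk.1 ∨ (key.1 = bk.1 ∧ key.2 < bk.2) then some (key, i) else some (bk, bi)

lemma pvStep_eq_bstep (st : Option ((Int × Int) × Int)) (s : Nat) (i ℓ : Int)
    (hst : ∀ k j, st = some (k, j) → ∃ d : Nat, k.1 = -(d : Int)) :
    pvStep (pvToDB st) s i ℓ = pvToDB (pvBStep st (-(s : Int), ℓ) i) := by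
  match st with
  | none =>
      simp only [pvToDB, pvBStep, pvStep]
      by_cases h : s > 0
      · simp [h]
      · have h0 : s = 0 := by omega
        simp [h0, pvUpd]
  | some ((nk, ℓ0), i0) =>
      obtain ⟨d, hd⟩ := hst (nk, ℓ0) i0 rfl
      simp only at hd
      subst hd
      have hT : pvToDB (some ((-(d : Int), ℓ0), i0)) = (d, some (i0, ℓ0)) := by
        simp [pvToDB]
      rw [hT]
      simp only [pvBStep, pvStep, pvUpd]
      by_cases h1 : s > d
      · have hc : (-(s : Int) < -(d : Int) ∨ (-(s : Int) = -(d : Int) ∧ ℓ < ℓ0)) := by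
          left; omega
        simp only [if_pos hc, if_pos h1, pvToDB]
        simp
      · by_cases h2 : s = d
        · subst h2
          by_cases h3 : ℓ < ℓ0
          · have hc : (-(s : Int) < -(s : Int) ∨ (-(s : Int) = -(s : Int) ∧ ℓ < ℓ0)) := by
              right; exact ⟨rfl, h3⟩
            simp only [if_pos hc, pvToDB]
            simp [h3]
          · have hc : ¬ (-(s : Int) < -(s : Int) ∨ (-(s : Int) = -(s : Int) ∧ ℓ < ℓ0)) := by
              rintro (hh | ⟨-, hh⟩)
              · exact lt_irrefl _ hh
              · exact h3 hh
            simp only [if_neg hc, if_neg h1, pvToDB]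
            simp [h3]
        · have hc : ¬ (-(s : Int) < -(d : Int) ∨ (-(s : Int) = -(d : Int) ∧ ℓ < ℓ0)) := by
            rintro (hh | ⟨hh, -⟩) <;> omega
          simp only [if_neg hc, if_neg h1, if_neg h2, pvToDB]
          simp

-- fold invariant over the enumerated container
lemma pvFold_invariant (ps : List (Int × String)) (q : List Char) (t : PvTrie)
    (st : Option ((Int × Int) × Int))
    (hst : ∀ k j, st = some (k, j) → ∃ d : Nat, k.1 = -(d : Int))
    (h : pvLookD t q = pvToDB st) :
    pvLookD (ps.foldl (fun t p => pvInsert t p.2.toList.reverse p.1 (PySem.Str.len p.2)) t) q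
      = pvToDB (ps.foldl (fun st p =>
          pvBStep st (-(pvSuf p.2.toList.reverse q : Int), PySem.Str.len p.2) p.1) st) := by
  induction ps generalizing t st with
  | nil => simpa using h
  | cons p ps' ih =>
      simp only [List.foldl_cons]
      apply ih
      · intro k j hkj
        cases st with
        | none =>
            simp only [pvBStep] at hkj
            injection hkj with h'
            obtain ⟨h1, h2⟩ := (Prod.mk.injEq _ _ _ _).mp h'
            exact ⟨pvSuf p.2.toList.reverse q, by rw [← h1]⟩
        | some bkbi =>
            rcases bkbi with ⟨bk, bi⟩
            simp only [pvBStep] at hkj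
            split at hkj
            · injection hkj with h'
              obtain ⟨h1, h2⟩ := (Prod.mk.injEq _ _ _ _).mp h'
              exact ⟨pvSuf p.2.toList.reverse q, by rw [← h1]⟩
            · injection hkj with h'
              obtain ⟨h1, h2⟩ := (Prod.mk.injEq _ _ _ _).mp h'
              obtain ⟨d, hd⟩ := hst bk bi rfl
              exact ⟨d, by rw [← h1]; exact hd⟩
      · rw [pvLookD_insert, h, pvStep_eq_bstep st _ _ _ hst]

-- per-query agreement
lemma pvQuery_eq (wc : List String) (q : String) :
    (match pvLook ((PySem.List.enumerate wc 0).foldl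
        (fun t p => pvInsert t p.2.toList.reverse p.1 (PySem.Str.len p.2))
        (PvTrie.mk none PvChildren.nil)) q.toList.reverse with
      | some (i, _) => i
      | none => 0)
    = (match (PySem.List.enumerate wc 0).foldl
          (fun st p => pvBStep st (-(pvSuf p.2.toList.reverse q.toList.reverse : Int),
            PySem.Str.len p.2) p.1) none with
        | some (_, i) => i
        | none => 0) := by
  rw [pvLook_eq_lookD]
  rw [pvFold_invariant (PySem.List.enumerate wc 0) q.toList.reverse
        (PvTrie.mk none PvChildren.nil) none (by intro k j h; cases h)
        (by cases q.toList.reverse <;> simp [pvLookD, pvToDB, pvChildGet])]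
  cases (PySem.List.enumerate wc 0).foldl
      (fun st p => pvBStep st (-(pvSuf p.2.toList.reverse q.toList.reverse : Int),
        PySem.Str.len p.2) p.1) none with
  | none => rfl
  | some kb => rcases kb with ⟨⟨nk, ℓ⟩, i⟩; rfl

-- ===== VERDICT (by name: the statement is the Claim_ definition above) =====
theorem stringIndices_spec : Claim_equal_stringIndices := by
  intro wc wq _ _
  unfold Spec_stringIndices stringIndices stringIndices_alt
  apply List.map_congr_left
  intro q _
  exact pvQuery_eq wc q
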